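-- pv_equiv track=rewrite | github.com/RetenQ/CL_Project | CL-Datasets/诗经/ci2cipai.py | collect_and_group_author_info
-- ===== SOURCE A (Python) =====
-- def collect_and_group_author_info(data):
--     author_info_dict = {}
--     for element in data:
--         author_info = f"{element['chapter']}-{element['section']}"
--         if element['chapter'] not in author_info_dict:
--             author_info_dict[element['chapter']] = set()  # 使用集合避免重复
--         author_info_dict[element['chapter']].add(author_info)
--     return author_info_dict
-- ===== SOURCE B (Python) =====
-- def collect_and_group_author_info(data):
--     # Two-pass decomposition: first list the distinct chapters in first-occurrence
--     # order, then build each chapter's set by one comprehension over the data.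
--     chapters = list(dict.fromkeys(e['chapter'] for e in data))
--     return {c: {f"{e['chapter']}-{e['section']}" for e in data if e['chapter'] == c}
--             for c in chapters}
-- ===== Notes on version B (the rewrite author's own statement) =====
-- stated objective: alternative
-- what changed: Replaces A's single hash-accumulation pass (membership test + in-place set mutation per element) by a two-pass decomposition: an ordered dedup of the chapter keys followed by a dict/set comprehension that scans the data once per chapter.
import Mathlib
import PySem

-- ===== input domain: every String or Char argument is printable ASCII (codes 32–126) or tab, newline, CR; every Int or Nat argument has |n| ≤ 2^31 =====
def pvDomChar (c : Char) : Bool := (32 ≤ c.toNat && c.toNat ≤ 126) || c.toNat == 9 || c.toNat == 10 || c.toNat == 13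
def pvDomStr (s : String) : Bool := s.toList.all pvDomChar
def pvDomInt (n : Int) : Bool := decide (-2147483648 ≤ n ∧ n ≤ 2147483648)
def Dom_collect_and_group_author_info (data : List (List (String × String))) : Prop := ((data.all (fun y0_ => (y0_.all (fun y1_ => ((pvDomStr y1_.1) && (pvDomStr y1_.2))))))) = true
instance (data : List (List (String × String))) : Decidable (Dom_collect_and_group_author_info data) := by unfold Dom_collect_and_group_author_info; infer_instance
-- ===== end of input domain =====

-- B replaces A's single hash-accumulation pass by an ordered dedup of the chapter
-- keys followed by one grouping scan per chapter (alternative decomposition, not faster).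


-- ===== PORT A =====
def collect_and_group_author_info (data : List (List (String × String))) : List (String × List String) :=
  (data.foldl (fun d e =>
      let ch := ((PySem.Dict.mk e).get? "chapter").getD ""
      let author_info := ch ++ "-" ++ ((PySem.Dict.mk e).get? "section").getD ""
      let d1 := if d.contains ch then d else d.insert ch PySem.Set.empty
      d1.modify ch PySem.Set.empty (fun s => PySem.Set.add s author_info))
    PySem.Dict.empty).items

-- ===== PORT B =====
def pvChapterOf (e : List (String × String)) : String :=
  ((PySem.Dict.mk e).get? "chapter").getD ""

def pvInfoOf (e : List (String × String)) : String :=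
  pvChapterOf e ++ "-" ++ ((PySem.Dict.mk e).get? "section").getD ""

-- the set comprehension {info(e) for e in data if e['chapter'] == c}
def pvGroupFor (data : List (List (String × String))) (c : String) : List String :=
  data.foldl (fun s e => if pvChapterOf e == c then PySem.Set.add s (pvInfoOf e) else s)
    PySem.Set.empty

def collect_and_group_author_info_alt (data : List (List (String × String))) : List (String × List String) :=
  let chapters := PySem.Set.ofList (data.map pvChapterOf)   -- dict.fromkeys = ordered dedup
  chapters.map (fun c => (c, pvGroupFor data c))

-- ===== PRECONDITION & SPEC =====
-- Pre_ excludes exactly the inputs where an element lacks key 'chapter' or 'section',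
-- on which the Python A raises KeyError.
def Pre_collect_and_group_author_info (data : List (List (String × String))) : Prop :=
  ∀ e ∈ data, "chapter" ∈ e.map Prod.fst ∧ "section" ∈ e.map Prod.fst
instance (data : List (List (String × String))) : Decidable (Pre_collect_and_group_author_info data) := by unfold Pre_collect_and_group_author_info; infer_instance

def pvWitness_collect_and_group_author_info : (List (List (String × String))) :=
  [[("chapter", "1"), ("section", "2")], [("chapter", "1"), ("section", "3")]]

def Spec_collect_and_group_author_info (data : List (List (String × String))) (out : List (String × List String)) : Prop := out = collect_and_group_author_info_alt data
instance (data : List (List (String × String))) (out : List (String × List String)) : Decidable (Spec_collect_and_group_author_info data out) := by unfold Spec_collect_and_group_author_info; infer_instance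

-- ===== CLAIM (what is proved, stated in full; the proofs are below) =====
def Claim_equal_collect_and_group_author_info : Prop := ∀ (data : List (List (String × String))), Dom_collect_and_group_author_info data → Pre_collect_and_group_author_info data → Spec_collect_and_group_author_info data (collect_and_group_author_info data)

-- ===== LEMMAS AND PROOFS =====

-- the group for chapter c after one more element
lemma pvGroupFor_append (xs : List (List (String × String))) (e : List (String × String)) (c : String) :
    pvGroupFor (xs ++ [e]) c =
      if pvChapterOf e == c then PySem.Set.add (pvGroupFor xs c) (pvInfoOf e)
      else pvGroupFor xs c := by
  simp [pvGroupFor, List.foldl_append]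

-- a chapter absent from xs has the empty group
lemma pvGroupFor_of_not_mem (xs : List (List (String × String))) (c : String)
    (h : c ∉ xs.map pvChapterOf) : pvGroupFor xs c = PySem.Set.empty := by
  unfold pvGroupFor
  rw [PySem.List.foldl_if_eq_foldl_filter]
  have : xs.filter (fun e => pvChapterOf e == c) = [] := by
    rw [List.filter_eq_nil_iff]
    intro e he
    simp only [beq_iff_eq]
    exact fun hc => h (hc ▸ List.mem_map_of_mem he)
  rw [this]; rfl

-- the loop invariant: A's dict-of-sets, as an items list, is B's value
lemma collect_items (data : List (List (String × String))) :
    collect_and_group_author_info data = collect_and_group_author_info_alt data := by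
  unfold collect_and_group_author_info collect_and_group_author_info_alt
  induction data using List.reverseRecOn with
  | nil => rfl
  | append_singleton xs e ih =>
    rw [List.foldl_append, List.foldl_cons, List.foldl_nil]
    set d := xs.foldl (fun d e =>
      let ch := ((PySem.Dict.mk e).get? "chapter").getD ""
      let author_info := ch ++ "-" ++ ((PySem.Dict.mk e).get? "section").getD ""
      let d1 := if d.contains ch then d else d.insert ch PySem.Set.empty
      d1.modify ch PySem.Set.empty (fun s => PySem.Set.add s author_info)) PySem.Dict.empty with hd
    set K := PySem.Set.ofList (xs.map pvChapterOf) with hK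
    have hitems : d.items = K.map (fun c => (c, pvGroupFor xs c)) := ih
    have hkeys : d.keys = K := by
      show d.items.map Prod.fst = K
      have hcomp : (Prod.fst ∘ fun c => (c, pvGroupFor xs c)) = id := by funext c; rfl
      rw [hitems, List.map_map, hcomp, List.map_id]
    have hnodK : K.Nodup := PySem.Set.nodup_ofList _
    have hcont : d.contains (pvChapterOf e) = decide (pvChapterOf e ∈ K) := by
      rw [PySem.Dict.contains_eq_decide_mem_keys, hkeys]
    have hKsnoc : PySem.Set.ofList ((xs ++ [e]).map pvChapterOf) = PySem.Set.add K (pvChapterOf e) := by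
      rw [List.map_append, PySem.Set.ofList_eq_foldl, List.foldl_append, ← PySem.Set.ofList_eq_foldl]
      rfl
    show (PySem.Dict.modify _ _ _ _).items = _
    simp only [show ((PySem.Dict.mk e).get? "chapter").getD "" = pvChapterOf e from rfl]
    simp only [show (fun s => PySem.Set.add s (pvChapterOf e ++ "-" ++ ((PySem.Dict.mk e).get? "section").getD "")) = (fun s => PySem.Set.add s (pvInfoOf e)) from rfl]
    by_cases hmem : pvChapterOf e ∈ K
    · -- chapter already present: in-place update of its set
      have hc : d.contains (pvChapterOf e) = true := by rw [hcont]; simpa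
      have hgetD : d.getD (pvChapterOf e) PySem.Set.empty = pvGroupFor xs (pvChapterOf e) := by
        apply PySem.Dict.getD_of_mem_items
        · rw [hitems]; exact List.mem_map_of_mem hmem
        · rw [hkeys]; exact hnodK
      have hadd : PySem.Set.add K (pvChapterOf e) = K := by
        unfold PySem.Set.add
        simp [PySem.Set.contains, hmem]
      rw [hKsnoc, hadd]
      unfold PySem.Dict.modify
      rw [hc]; rw [if_pos rfl]
      rw [PySem.Dict.items_insert_of_contains _ _ hc, hgetD, hitems, List.map_map]
      apply List.map_congr_left
      intro c _
      by_cases hce : c = pvChapterOf e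
      · subst hce
        simp [pvGroupFor_append]
      · have h2 : (pvChapterOf e == c) = false := by simpa using (Ne.symm hce)
        simp [pvGroupFor_append, h2, hce]
    · -- new chapter: append (chapter, {info}) at the end
      have hc : d.contains (pvChapterOf e) = false := by rw [hcont]; simpa
      have hadd : PySem.Set.add K (pvChapterOf e) = K ++ [pvChapterOf e] := by
        unfold PySem.Set.add
        simp [PySem.Set.contains, hmem]
      unfold PySem.Dict.modify
      rw [hc]; simp only [Bool.false_eq_true, if_false]
      rw [PySem.Dict.getD_insert_self, PySem.Dict.insert_insert_self]
      have hc' : d.contains (pvChapterOf e) = false := hc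
      rw [PySem.Dict.items_insert_of_not_contains _ _ hc']
      rw [hKsnoc, hadd, List.map_append, hitems]
      have hxsempty : pvGroupFor xs (pvChapterOf e) = PySem.Set.empty := by
        apply pvGroupFor_of_not_mem
        intro hmm
        exact hmem ((PySem.Set.mem_ofList _ _).2 hmm)
      congr 1
      · apply List.map_congr_left
        intro c hcK
        have hce : pvChapterOf e ≠ c := fun h => hmem (h ▸ hcK)
        have h2 : (pvChapterOf e == c) = false := by simpa using hce
        simp [pvGroupFor_append, h2]
      · simp [pvGroupFor_append, hxsempty]

-- ===== VERDICT (by name: the statement is the Claim_ definition above) =====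
theorem collect_and_group_author_info_spec : Claim_equal_collect_and_group_author_info := by
  intro data _ _
  unfold Spec_collect_and_group_author_info
  exact collect_items data
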